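-- pv_equiv track=rewrite | github.com/grapheneaffiliate/h4-polytopic-attention | arc_final.py | solve_75b8110e
-- ===== SOURCE A (Python) =====
-- def solve_75b8110e(grid):
--     H, W = len(grid), len(grid[0])
--     h, w = H // 2, W // 2
--     TL = [[grid[r][c] for c in range(w)] for r in range(h)]
--     TR = [[grid[r][c] for c in range(w, W)] for r in range(h)]
--     BL = [[grid[r][c] for c in range(w)] for r in range(h, H)]
--     BR = [[grid[r][c] for c in range(w, W)] for r in range(h, H)]
--     result = [[0] * w for _ in range(h)]
--     for r in range(h):
--         for c in range(w):
--             if TR[r][c] != 0: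
--                 result[r][c] = TR[r][c]
--             elif BL[r][c] != 0:
--                 result[r][c] = BL[r][c]
--             elif BR[r][c] != 0:
--                 result[r][c] = BR[r][c]
--             elif TL[r][c] != 0:
--                 result[r][c] = TL[r][c]
--     return result
-- ===== SOURCE B (Python) =====
-- def solve_75b8110e(grid):
--     H, W = len(grid), len(grid[0])
--     h, w = H // 2, W // 2
--
--     def quad(r0, c0):
--         return [row[c0:c0 + w] for row in grid[r0:r0 + h]]
--
--     def overlay(base, top):
--         return [[t if t != 0 else b for b, t in zip(brow, trow)]
--                 for brow, trow in zip(base, top)]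
--
--     result = [[0] * w for _ in range(h)]
--     # reverse priority: later overlays win, so TR ends up strongest
--     for r0, c0 in [(0, 0), (h, w), (h, 0), (0, w)]:
--         result = overlay(result, quad(r0, c0))
--     return result
-- ===== Notes on version B (the rewrite author's own statement) =====
-- stated objective: alternative
-- what changed: Replaces the per-cell if/elif priority chain over four precopied quadrants by staged whole-grid passes: each quadrant is sliced out and merged onto an accumulator with an elementwise overlay (top wins where nonzero), folded in reverse priority order TL, BR, BL, TR.
import Mathlib
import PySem

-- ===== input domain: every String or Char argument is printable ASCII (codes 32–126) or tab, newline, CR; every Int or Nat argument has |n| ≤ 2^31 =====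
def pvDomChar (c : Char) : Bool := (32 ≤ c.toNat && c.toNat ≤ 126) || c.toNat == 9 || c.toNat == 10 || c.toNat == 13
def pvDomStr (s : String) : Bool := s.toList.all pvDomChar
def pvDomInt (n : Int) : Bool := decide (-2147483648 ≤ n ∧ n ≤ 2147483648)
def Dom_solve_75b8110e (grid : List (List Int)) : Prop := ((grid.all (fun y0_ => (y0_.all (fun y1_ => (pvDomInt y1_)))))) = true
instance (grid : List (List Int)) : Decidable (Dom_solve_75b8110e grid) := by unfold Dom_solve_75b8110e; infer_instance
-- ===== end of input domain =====

-- B replaces the per-cell if/elif priority chain over four precopied quadrants by staged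
-- whole-grid overlay passes folded in reverse priority order (objective: alternative).

-- grid[r][c] for nonnegative indices; the .getD defaults never fire under Pre_ (in-range indices)
def pvCell (grid : List (List Int)) (r c : Nat) : Int :=
  (PySem.List.pyGet? ((PySem.List.pyGet? grid (r : Int)).getD []) (c : Int)).getD 0

-- ===== PORT A =====
def solve_75b8110e (grid : List (List Int)) : List (List Int) :=
  let H := grid.length
  let W := ((PySem.List.pyGet? grid 0).getD []).length
  let h := H / 2
  let w := W / 2
  let TL := (List.range h).map (fun r => (List.range w).map (fun c => pvCell grid r c))
  let TR := (List.range h).map (fun r => (List.range' w (W - w)).map (fun c => pvCell grid r c))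
  let BL := (List.range' h (H - h)).map (fun r => (List.range w).map (fun c => pvCell grid r c))
  let BR := (List.range' h (H - h)).map (fun r => (List.range' w (W - w)).map (fun c => pvCell grid r c))
  (List.range h).map (fun r => (List.range w).map (fun c =>
    if pvCell TR r c ≠ 0 then pvCell TR r c
    else if pvCell BL r c ≠ 0 then pvCell BL r c
    else if pvCell BR r c ≠ 0 then pvCell BR r c
    else if pvCell TL r c ≠ 0 then pvCell TL r c
    else 0))

-- ===== PORT B =====
-- quad(r0, c0): slice of h rows starting at r0, each sliced to w columns starting at c0
def pvQuad (grid : List (List Int)) (h w r0 c0 : Nat) : List (List Int) :=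
  (PySem.List.slice grid (some (r0 : Int)) (some ((r0 : Int) + (h : Int)))).map
    (fun row => PySem.List.slice row (some (c0 : Int)) (some ((c0 : Int) + (w : Int))))

-- overlay(base, top): elementwise, the top value wins where nonzero
def pvOverlay (base top : List (List Int)) : List (List Int) :=
  (base.zip top).map (fun p => (p.1.zip p.2).map (fun q => if q.2 ≠ 0 then q.2 else q.1))

def solve_75b8110e_alt (grid : List (List Int)) : List (List Int) :=
  let H := grid.length
  let W := ((PySem.List.pyGet? grid 0).getD []).length
  let h := H / 2
  let w := W / 2
  let init := (List.range h).map (fun _ => List.replicate w (0 : Int))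
  ([((0 : Nat), (0 : Nat)), (h, w), (h, 0), (0, w)]).foldl
    (fun res p => pvOverlay res (pvQuad grid h w p.1 p.2)) init

-- ===== PRECONDITION & SPEC =====
-- Pre_: exactly where Python A returns — grid nonempty and every row at least as long as row 0
-- (on the empty grid A raises IndexError at grid[0]; on a row shorter than len(grid[0]) the quadrant
-- comprehensions raise IndexError).
def Pre_solve_75b8110e (grid : List (List Int)) : Prop :=
  grid ≠ [] ∧ ∀ row ∈ grid, (grid.headD []).length ≤ row.length
instance (grid : List (List Int)) : Decidable (Pre_solve_75b8110e grid) := by unfold Pre_solve_75b8110e; infer_instance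

def pvWitness_solve_75b8110e : List (List Int) := [[1, 0], [0, 2]]

def Spec_solve_75b8110e (grid : List (List Int)) (out : List (List Int)) : Prop := out = solve_75b8110e_alt grid
instance (grid : List (List Int)) (out : List (List Int)) : Decidable (Spec_solve_75b8110e grid out) := by unfold Spec_solve_75b8110e; infer_instance

-- ===== CLAIM (what is proved, stated in full; the proofs are below) =====
def Claim_equal_solve_75b8110e : Prop := ∀ (grid : List (List Int)), Dom_solve_75b8110e grid → Pre_solve_75b8110e grid → Spec_solve_75b8110e grid (solve_75b8110e grid)

-- ===== LEMMAS AND PROOFS =====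

theorem pvCell_eq (g : List (List Int)) (r c : Nat) (hr : r < g.length) (hc : c < g[r].length) :
    pvCell g r c = g[r][c] := by
  simp [pvCell, hr, hc]

-- a quadrant slice in canonical map-over-range form
theorem quad_canon (g : List (List Int)) (h w r0 c0 : Nat)
    (h1 : r0 + h ≤ g.length) (h2 : ∀ row ∈ g, c0 + w ≤ row.length) :
    pvQuad g h w r0 c0
      = (List.range h).map (fun r => (List.range w).map (fun c => pvCell g (r0 + r) (c0 + c))) := by
  unfold pvQuad
  rw [PySem.List.slice_natCast_add]
  apply List.ext_getElem
  · simp; omega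
  · intro r hra hrb
    simp only [List.getElem_map, List.getElem_take, List.getElem_drop, List.getElem_range]
    have hlen : r < h := by simpa using hrb
    have hrg : r0 + r < g.length := by omega
    rw [PySem.List.slice_natCast_add]
    have hrow : c0 + w ≤ g[r0 + r].length := h2 _ (List.getElem_mem _)
    apply List.ext_getElem
    · simp; omega
    · intro c hca hcb
      simp only [List.getElem_map, List.getElem_take, List.getElem_drop, List.getElem_range]
      have hcw : c < w := by simpa using hcb
      rw [pvCell_eq g (r0 + r) (c0 + c) hrg (by omega)]

-- overlaying two canonical-form grids is a canonical-form grid of the pointwise choice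
theorem overlay_canon (h w : Nat) (f g : Nat → Nat → Int) :
    pvOverlay ((List.range h).map (fun r => (List.range w).map (f r)))
              ((List.range h).map (fun r => (List.range w).map (g r)))
      = (List.range h).map (fun r => (List.range w).map (fun c =>
          if g r c ≠ 0 then g r c else f r c)) := by
  simp [pvOverlay, List.zip_map']

theorem replicate_zero_canon (w : Nat) :
    List.replicate w (0 : Int) = (List.range w).map (fun _ => (0 : Int)) := by
  simp [List.map_const']

-- A-side: reading a cell of a quadrant built over range/range' columns reads the source at the offset
theorem pvCell_map_range_range' (g : List (List Int)) (h w k r c : Nat)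
    (hr : r < h) (hc : c < k) :
    pvCell ((List.range h).map (fun r => (List.range' w k).map (fun c => pvCell g r c))) r c
      = pvCell g r (w + c) := by
  simp only [pvCell, PySem.List.pyGet?_natCast]
  simp [hr, hc]

theorem pvCell_map_range'_range (g : List (List Int)) (h0 k0 w r c : Nat)
    (hr : r < k0) (hc : c < w) :
    pvCell ((List.range' h0 k0).map (fun r => (List.range w).map (fun c => pvCell g r c))) r c
      = pvCell g (h0 + r) c := by
  simp only [pvCell, PySem.List.pyGet?_natCast]
  simp [hr, hc]

theorem pvCell_map_range'_range' (g : List (List Int)) (h0 k0 w k r c : Nat)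
    (hr : r < k0) (hc : c < k) :
    pvCell ((List.range' h0 k0).map (fun r => (List.range' w k).map (fun c => pvCell g r c))) r c
      = pvCell g (h0 + r) (w + c) := by
  simp only [pvCell, PySem.List.pyGet?_natCast]
  simp [hr, hc]

theorem pvCell_map_range_range (g : List (List Int)) (h w r c : Nat)
    (hr : r < h) (hc : c < w) :
    pvCell ((List.range h).map (fun r => (List.range w).map (fun c => pvCell g r c))) r c
      = pvCell g r c := by
  simp only [pvCell, PySem.List.pyGet?_natCast]
  simp [hr, hc]

-- ===== VERDICT (by name: the statement is the Claim_ definition above) =====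
theorem solve_75b8110e_spec : Claim_equal_solve_75b8110e := by
  intro grid _ hpre
  obtain ⟨hne, hrows⟩ := hpre
  unfold Spec_solve_75b8110e solve_75b8110e solve_75b8110e_alt
  simp only []
  have hW : ((PySem.List.pyGet? grid 0).getD []).length = (grid.headD []).length := by
    cases grid with
    | nil => simp at hne
    | cons a l => simp [PySem.List.pyGet?, PySem.List.pyIdx?]
  set H := grid.length with hH
  set W := ((PySem.List.pyGet? grid 0).getD []).length with hWdef
  have hhH : H / 2 + H / 2 ≤ H := by omega
  have hrow' : ∀ row ∈ grid, W ≤ row.length := by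
    intro row hr; rw [hW]; exact hrows row hr
  have hq : ∀ r0 c0 : Nat, r0 + H / 2 ≤ H → c0 + W / 2 ≤ W →
      pvQuad grid (H / 2) (W / 2) r0 c0
        = (List.range (H / 2)).map (fun r => (List.range (W / 2)).map (fun c => pvCell grid (r0 + r) (c0 + c))) := by
    intro r0 c0 h1 h2
    exact quad_canon grid _ _ r0 c0 h1 (fun row hr => le_trans (by omega) (hrow' row hr))
  rw [List.foldl_cons, List.foldl_cons, List.foldl_cons, List.foldl_cons, List.foldl_nil]
  simp only [replicate_zero_canon]
  rw [hq 0 0 (by omega) (by omega), hq (H / 2) (W / 2) (by omega) (by omega),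
      hq (H / 2) 0 (by omega) (by omega), hq 0 (W / 2) (by omega) (by omega)]
  rw [overlay_canon, overlay_canon, overlay_canon, overlay_canon]
  apply List.map_congr_left
  intro r hr
  apply List.map_congr_left
  intro c hc
  rw [List.mem_range] at hr hc
  rw [pvCell_map_range_range' grid _ _ _ _ _ hr (by omega),
      pvCell_map_range'_range grid _ _ _ _ _ (by omega) hc,
      pvCell_map_range'_range' grid _ _ _ _ _ _ (by omega) (by omega),
      pvCell_map_range_range grid _ _ _ _ hr hc]
  simp only [Nat.zero_add]
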